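-- pv_equiv track=rewrite | github.com/vanicat/advant-soluce-python | soluce13.py | find_symetrie
-- ===== SOURCE A (Python) =====
-- def find_symetrie(line:list[int]) -> int:
--     """Search for mirror, mirror are supposed between column"""
--     # check from left
--     try:
--         p = 1
--         while True:
--             next = line.index(line[0], p)
--
--             if next % 2 == 0:
--                 p = next + 1
--                 continue
--
--             found = True
--             for i in range((next + 1)//2):
--                  if line[i] != line[next - i]:
--                       found = False
--                       break
--             if found:
--                  return (next + 1) // 2
--
--             p = next + 1
--
--     except ValueError:
--          pass
--
--     try:
--         p = 0
--         while True:
--             next = line.index(line[-1], p, -1)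
--
--             if (len(line) - next) % 2 == 1:
--                 p = next + 1
--                 continue
--
--             found = True
--             i = 0
--             for i in range(1, (len(line) - next)//2):
--                  if line[next + i] != line[-i - 1]:
--                       found = False
--                       break
--             if found:
--                  return (next + len(line))//2
--
--             p = next + 1
--
--     except ValueError:
--          pass
--
--     return 0
-- ===== SOURCE B (Python) =====
-- def find_symetrie(line: list[int]) -> int:
--     """Search for mirror, mirror are supposed between column"""
--     # Candidate-elimination sieve: keep the set of still-viable mirror axes and
--     # kill them one comparison-distance at a time; the first survivor is the answer
--     # (axes <= n//2 need a full palindromic prefix, axes beyond need a palindromic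
--     # suffix, and smaller axes come first, matching the required preference).
--     n = len(line)
--     cands = list(range(1, n))
--     for d in range(n // 2):
--         if not cands:
--             break
--         cands = [p for p in cands
--                  if p - 1 - d < 0 or p + d >= n or line[p - 1 - d] == line[p + d]]
--     return cands[0] if cands else 0
-- ===== Notes on version B (the rewrite author's own statement) =====
-- stated objective: alternative
-- what changed: A anchors candidates on the first/last element via repeated .index calls inside try/except and fully re-verifies one axis at a time; B keeps the whole set of viable mirror axes and eliminates them by filtering once per comparison distance, returning the first survivor, with no per-axis verification pass at all.
import Mathlib
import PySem

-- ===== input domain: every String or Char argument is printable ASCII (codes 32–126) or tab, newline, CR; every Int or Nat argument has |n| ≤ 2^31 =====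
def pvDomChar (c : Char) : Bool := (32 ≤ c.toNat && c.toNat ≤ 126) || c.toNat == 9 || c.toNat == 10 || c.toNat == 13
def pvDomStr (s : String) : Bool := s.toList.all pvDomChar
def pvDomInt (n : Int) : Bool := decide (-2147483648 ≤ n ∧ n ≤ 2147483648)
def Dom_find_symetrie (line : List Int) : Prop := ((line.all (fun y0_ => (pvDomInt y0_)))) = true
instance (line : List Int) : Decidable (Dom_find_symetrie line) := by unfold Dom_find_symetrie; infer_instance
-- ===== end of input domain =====

-- B replaces A's exception-driven per-candidate verification (two `.index` anchored
-- loops, each fully re-checking one axis at a time) with a candidate-elimination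
-- sieve: keep the list of still-viable axes and filter it once per comparison
-- distance; the first survivor is the answer (objective: alternative).

-- ===== PORT A =====
def pvIdxFrom (line : List Int) (v : Int) (stop p : Nat) : Option Nat :=
  if p < stop then
    if line.getD p 0 == v then some p else pvIdxFrom line v stop (p + 1)
  else none
termination_by stop - p
theorem pvIdxFrom_bounds {line : List Int} {v : Int} {stop p j : Nat}
    (h : pvIdxFrom line v stop p = some j) : p ≤ j ∧ j < stop := by
  fun_induction pvIdxFrom line v stop p with
  | case1 p h1 h2 => simp_all
  | case2 p h1 h2 ih => have := ih h; omega
  | case3 p h1 => simp_all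
def pvLoop1 (line : List Int) (p : Nat) : Option Int :=
  match h : pvIdxFrom line (line.getD 0 0) line.length p with
  | none => none
  | some next =>
    if next % 2 == 0 then pvLoop1 line (next + 1)
    else if (List.range ((next + 1) / 2)).all
        (fun i => line.getD i 0 == line.getD (next - i) 0) then
      some (((next + 1) / 2 : Nat) : Int)
    else pvLoop1 line (next + 1)
termination_by line.length - p
decreasing_by all_goals (have := pvIdxFrom_bounds h; omega)
def pvLoop2 (line : List Int) (p : Nat) : Option Int :=
  match h : pvIdxFrom line (line.getD (line.length - 1) 0) (line.length - 1) p with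
  | none => none
  | some next =>
    if (line.length - next) % 2 == 1 then pvLoop2 line (next + 1)
    else if (List.range' 1 ((line.length - next) / 2 - 1)).all
        (fun i => line.getD (next + i) 0 == line.getD (line.length - 1 - i) 0) then
      some (((next + line.length) / 2 : Nat) : Int)
    else pvLoop2 line (next + 1)
termination_by line.length - p
decreasing_by all_goals (have := pvIdxFrom_bounds h; omega)
def find_symetrie (line : List Int) : Int :=
  match pvLoop1 line 1 with
  | some r => r
  | none =>
    match pvLoop2 line 0 with
    | some r => r
    | none => 0

-- ===== PORT B =====
-- Source B: cands = list(range(1, n)); for d in range(n // 2): if not cands: break;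
--       cands = [p for p in cands if p-1-d < 0 or p+d >= n or line[p-1-d] == line[p+d]]
-- (indices p, d are nonnegative throughout, so Nat indices are exact; the guard
--  `p - 1 - d < 0` is `p < 1 + d` and both list accesses are in range when kept).
def pvOK (line : List Int) (n d p : Nat) : Bool :=
  decide (p < 1 + d) || decide (n ≤ p + d) || (line.getD (p - 1 - d) 0 == line.getD (p + d) 0)
def pvSieveStep (line : List Int) (n : Nat) (cs : List Nat) (d : Nat) : List Nat :=
  if cs.isEmpty then cs
  else cs.filter (pvOK line n d)
def find_symetrie_alt (line : List Int) : Int :=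
  match (List.range (line.length / 2)).foldl (pvSieveStep line line.length)
      (List.range' 1 (line.length - 1)) with
  | p :: _ => (p : Int)
  | [] => 0

-- ===== PRECONDITION & SPEC =====
-- A reads the first and the last element: on the empty list it raises IndexError.
def Pre_find_symetrie (line : List Int) : Prop := line ≠ []
instance (line : List Int) : Decidable (Pre_find_symetrie line) := by unfold Pre_find_symetrie; infer_instance
def pvWitness_find_symetrie : List Int := [1, 2, 2, 1]

def Spec_find_symetrie (line : List Int) (out : Int) : Prop := out = find_symetrie_alt line
instance (line : List Int) (out : Int) : Decidable (Spec_find_symetrie line out) := by unfold Spec_find_symetrie; infer_instance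

-- ===== CLAIM (what is proved, stated in full; the proofs are below) =====
def Claim_equal_find_symetrie : Prop := ∀ (line : List Int), Dom_find_symetrie line → Pre_find_symetrie line → Spec_find_symetrie line (find_symetrie line)

-- ===== LEMMAS AND PROOFS =====

def pal1 (line : List Int) (j : Nat) : Bool :=
  j % 2 == 1 && (List.range ((j + 1) / 2)).all
    (fun i => line.getD i 0 == line.getD (j - i) 0)

theorem pal1_of_ne {line : List Int} {j : Nat} (hj : 1 ≤ j)
    (h : ¬ line.getD j 0 = line.getD 0 0) : pal1 line j = false := by
  have h0 : (0 : Nat) ∈ List.range ((j + 1) / 2) := by rw [List.mem_range]; omega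
  unfold pal1
  refine Bool.and_eq_false_iff.mpr (Or.inr (List.all_eq_false.mpr ⟨0, h0, ?_⟩))
  simp only [Nat.sub_zero, beq_iff_eq]
  exact fun he => h he.symm

theorem pvIdxFrom_eq_find? (line : List Int) (v : Int) (stop p : Nat) :
    pvIdxFrom line v stop p =
      (List.range' p (stop - p)).find? (fun j => line.getD j 0 == v) := by
  fun_induction pvIdxFrom line v stop p with
  | case1 p h1 h2 =>
    have hs : stop - p = (stop - (p+1)) + 1 := by omega
    rw [hs, List.range'_succ]
    exact (List.find?_cons_of_pos (p := fun j => line.getD j 0 == v) h2).symm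
  | case2 p h1 h2 ih =>
    have hs : stop - p = (stop - (p+1)) + 1 := by omega
    rw [hs, List.range'_succ, ih]
    exact (List.find?_cons_of_neg (p := fun j => line.getD j 0 == v) (by simpa using h2)).symm
  | case3 p h1 =>
    have hs : stop - p = 0 := by omega
    simp [hs]

-- skipped indices falsify pal1
theorem pal1_skip {line : List Int} {j : Nat}
    (h : ¬ (line.getD j 0 == line.getD 0 0) = true) : pal1 line j = false := by
  rcases Nat.eq_zero_or_pos j with h0 | h1
  · subst h0; simp at h
  · exact pal1_of_ne h1 (by simpa using h)

theorem pvLoop1_eq (line : List Int) (p : Nat) :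
    pvLoop1 line p = ((List.range' p (line.length - p)).find? (pal1 line)).map
      (fun j => (((j + 1) / 2 : Nat) : Int)) := by
  fun_induction pvLoop1 line p with
  | case1 p h =>  -- none
    rw [pvIdxFrom_eq_find?, List.find?_range'_eq_none] at h
    have hn : List.find? (pal1 line) (List.range' p (line.length - p)) = none := by
      rw [List.find?_range'_eq_none]
      intro j hj1 hj2
      have hf := h j hj1 hj2
      rw [Bool.not_eq_true'] at hf
      have hp : pal1 line j = false := pal1_skip (fun hx => by rw [hx] at hf; simp at hf)
      simp [hp]
    rw [hn]; rfl
  | case2 p next h heven ih =>  -- even skip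
    have hb := pvIdxFrom_bounds h
    rw [pvIdxFrom_eq_find?, List.find?_range'_eq_some] at h
    obtain ⟨hv, hmem, hmin⟩ := h
    rw [ih]
    have hsplit : List.range' p (line.length - p) =
        List.range' p (next + 1 - p) ++ List.range' (next + 1) (line.length - (next + 1)) := by
      have := List.range'_append_1 (s := p) (m := next + 1 - p) (n := line.length - (next + 1))
      rw [show p + (next + 1 - p) = next + 1 from by omega,
          show next + 1 - p + (line.length - (next + 1)) = line.length - p from by omega] at this
      exact this.symm
    have hn : List.find? (pal1 line) (List.range' p (next + 1 - p)) = none := by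
      rw [List.find?_range'_eq_none]
      intro j hj1 hj2
      simp only [Bool.not_eq_eq_eq_not, Bool.not_true]
      rcases Nat.lt_or_ge j next with hlt | hge
      · exact pal1_skip (by simpa using hmin j hj1 hlt)
      · have hjn : j = next := by omega
        rw [hjn]
        unfold pal1
        simp only [beq_iff_eq] at heven
        simp [heven]
    rw [hsplit, List.find?_append, hn, Option.none_or]
  | case3 p next h heven hall =>  -- found
    have hb := pvIdxFrom_bounds h
    rw [pvIdxFrom_eq_find?, List.find?_range'_eq_some] at h
    obtain ⟨hv, hmem, hmin⟩ := h
    have hfound : (List.range' p (line.length - p)).find? (pal1 line) = some next := by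
      rw [List.find?_range'_eq_some]
      refine ⟨?_, ?_, ?_⟩
      · unfold pal1
        rw [hall, Bool.and_true]
        simp only [beq_iff_eq] at heven ⊢
        omega
      · rw [List.mem_range'_1]; omega
      · intro j hj1 hj2
        simp only [Bool.not_eq_eq_eq_not, Bool.not_true]
        exact pal1_skip (by simpa using hmin j hj1 hj2)
    rw [hfound]; rfl
  | case4 p next h heven hall ih =>  -- palindrome check failed
    have hb := pvIdxFrom_bounds h
    rw [pvIdxFrom_eq_find?, List.find?_range'_eq_some] at h
    obtain ⟨hv, hmem, hmin⟩ := h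
    rw [ih]
    have hsplit : List.range' p (line.length - p) =
        List.range' p (next + 1 - p) ++ List.range' (next + 1) (line.length - (next + 1)) := by
      have := List.range'_append_1 (s := p) (m := next + 1 - p) (n := line.length - (next + 1))
      rw [show p + (next + 1 - p) = next + 1 from by omega,
          show next + 1 - p + (line.length - (next + 1)) = line.length - p from by omega] at this
      exact this.symm
    have hn : List.find? (pal1 line) (List.range' p (next + 1 - p)) = none := by
      rw [List.find?_range'_eq_none]
      intro j hj1 hj2
      simp only [Bool.not_eq_eq_eq_not, Bool.not_true]
      rcases Nat.lt_or_ge j next with hlt | hge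
      · exact pal1_skip (by simpa using hmin j hj1 hlt)
      · have hjn : j = next := by omega
        rw [hjn]
        unfold pal1
        rw [show ((List.range ((next + 1) / 2)).all fun i => line.getD i 0 == line.getD (next - i) 0) = false from by simpa using hall, Bool.and_false]
    rw [hsplit, List.find?_append, hn, Option.none_or]

def pal2 (line : List Int) (s : Nat) : Bool :=
  (line.length - s) % 2 == 0 &&
  line.getD s 0 == line.getD (line.length - 1) 0 &&
  (List.range' 1 ((line.length - s) / 2 - 1)).all
    (fun i => line.getD (s + i) 0 == line.getD (line.length - 1 - i) 0)

theorem pal2_skip {line : List Int} {s : Nat}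
    (h : ¬ (line.getD s 0 == line.getD (line.length - 1) 0) = true) : pal2 line s = false := by
  unfold pal2
  rw [show (line.getD s 0 == line.getD (line.length - 1) 0) = false from by simpa using h,
    Bool.and_false, Bool.false_and]

theorem pvLoop2_eq (line : List Int) (p : Nat) :
    pvLoop2 line p = ((List.range' p (line.length - 1 - p)).find? (pal2 line)).map
      (fun s => (((s + line.length) / 2 : Nat) : Int)) := by
  fun_induction pvLoop2 line p with
  | case1 p h =>  -- none
    rw [pvIdxFrom_eq_find?, List.find?_range'_eq_none] at h
    have hn : List.find? (pal2 line) (List.range' p (line.length - 1 - p)) = none := by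
      rw [List.find?_range'_eq_none]
      intro j hj1 hj2
      have hf := h j hj1 hj2
      rw [Bool.not_eq_true'] at hf
      have hp : pal2 line j = false := pal2_skip (fun hx => by rw [hx] at hf; simp at hf)
      simp [hp]
    rw [hn]; rfl
  | case2 p next h hodd ih =>  -- parity skip
    have hb := pvIdxFrom_bounds h
    rw [pvIdxFrom_eq_find?, List.find?_range'_eq_some] at h
    obtain ⟨hv, hmem, hmin⟩ := h
    rw [ih]
    have hsplit : List.range' p (line.length - 1 - p) =
        List.range' p (next + 1 - p) ++ List.range' (next + 1) (line.length - 1 - (next + 1)) := by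
      have := List.range'_append_1 (s := p) (m := next + 1 - p) (n := line.length - 1 - (next + 1))
      rw [show p + (next + 1 - p) = next + 1 from by omega,
          show next + 1 - p + (line.length - 1 - (next + 1)) = line.length - 1 - p from by omega] at this
      exact this.symm
    have hn : List.find? (pal2 line) (List.range' p (next + 1 - p)) = none := by
      rw [List.find?_range'_eq_none]
      intro j hj1 hj2
      simp only [Bool.not_eq_eq_eq_not, Bool.not_true]
      rcases Nat.lt_or_ge j next with hlt | hge
      · have hf := hmin j hj1 hlt
        rw [Bool.not_eq_true'] at hf
        exact pal2_skip (fun hx => by rw [hx] at hf; simp at hf)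
      · have hjn : j = next := by omega
        rw [hjn]
        unfold pal2
        simp only [beq_iff_eq] at hodd
        rw [show ((line.length - next) % 2 == 0) = false from by simp [hodd], Bool.false_and,
          Bool.false_and]
    rw [hsplit, List.find?_append, hn, Option.none_or]
  | case3 p next h hodd hall =>  -- found
    have hb := pvIdxFrom_bounds h
    rw [pvIdxFrom_eq_find?, List.find?_range'_eq_some] at h
    obtain ⟨hv, hmem, hmin⟩ := h
    have hfound : (List.range' p (line.length - 1 - p)).find? (pal2 line) = some next := by
      rw [List.find?_range'_eq_some]
      refine ⟨?_, ?_, ?_⟩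
      · unfold pal2
        rw [hall, Bool.and_true, hv, Bool.and_true]
        simp only [beq_iff_eq] at hodd ⊢
        omega
      · rw [List.mem_range'_1]; omega
      · intro j hj1 hj2
        simp only [Bool.not_eq_eq_eq_not, Bool.not_true]
        have hf := hmin j hj1 hj2
        rw [Bool.not_eq_true'] at hf
        exact pal2_skip (fun hx => by rw [hx] at hf; simp at hf)
    rw [hfound]; rfl
  | case4 p next h hodd hall ih =>  -- palindrome check failed
    have hb := pvIdxFrom_bounds h
    rw [pvIdxFrom_eq_find?, List.find?_range'_eq_some] at h
    obtain ⟨hv, hmem, hmin⟩ := h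
    rw [ih]
    have hsplit : List.range' p (line.length - 1 - p) =
        List.range' p (next + 1 - p) ++ List.range' (next + 1) (line.length - 1 - (next + 1)) := by
      have := List.range'_append_1 (s := p) (m := next + 1 - p) (n := line.length - 1 - (next + 1))
      rw [show p + (next + 1 - p) = next + 1 from by omega,
          show next + 1 - p + (line.length - 1 - (next + 1)) = line.length - 1 - p from by omega] at this
      exact this.symm
    have hn : List.find? (pal2 line) (List.range' p (next + 1 - p)) = none := by
      rw [List.find?_range'_eq_none]
      intro j hj1 hj2
      simp only [Bool.not_eq_eq_eq_not, Bool.not_true]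
      rcases Nat.lt_or_ge j next with hlt | hge
      · have hf := hmin j hj1 hlt
        rw [Bool.not_eq_true'] at hf
        exact pal2_skip (fun hx => by rw [hx] at hf; simp at hf)
      · have hjn : j = next := by omega
        rw [hjn]
        unfold pal2
        rw [show ((List.range' 1 ((line.length - next) / 2 - 1)).all
            (fun i => line.getD (next + i) 0 == line.getD (line.length - 1 - i) 0)) = false from
          Bool.eq_false_iff.mpr hall, Bool.and_false]
    rw [hsplit, List.find?_append, hn, Option.none_or]

theorem pal1_odd {line : List Int} {j : Nat} (h : pal1 line j = true) : j % 2 = 1 := by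
  unfold pal1 at h
  rw [Bool.and_eq_true] at h
  simpa using h.1

theorem pal2_even {line : List Int} {s : Nat} (h : pal2 line s = true) :
    (line.length - s) % 2 = 0 := by
  unfold pal2 at h
  rw [Bool.and_eq_true, Bool.and_eq_true] at h
  simpa using h.1.1

theorem F1_eq_G1 (line : List Int) :
    (List.range' 1 (line.length - 1)).find? (pal1 line) =
      ((List.range (line.length / 2)).find? (fun k => pal1 line (2 * k + 1))).map
        (fun k => 2 * k + 1) := by
  cases hF : (List.range' 1 (line.length - 1)).find? (pal1 line) with
  | none =>
    rw [List.find?_range'_eq_none] at hF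
    rw [List.find?_range_eq_none.mpr ?_]
    · rfl
    · intro k hk
      have := hF (2 * k + 1) (by omega) (by omega)
      simpa using this
  | some j =>
    rw [List.find?_range'_eq_some] at hF
    obtain ⟨hpj, hmem, hmin⟩ := hF
    rw [List.mem_range'_1] at hmem
    have hodd := pal1_odd hpj
    have hkj : j = 2 * ((j - 1) / 2) + 1 := by omega
    have hklt : (j - 1) / 2 < line.length / 2 := by omega
    rw [List.find?_range_eq_some.mpr ⟨by rw [← hkj]; exact hpj, by simpa using hklt, ?_⟩]
    · simp [← hkj]
    · intro k' hk'
      have := hmin (2 * k' + 1) (by omega) (by omega)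
      simpa using this

theorem F2_eq_G2 (line : List Int) :
    (List.range (line.length - 1)).find? (pal2 line) =
      ((List.range (line.length / 2)).find?
          (fun k => pal2 line (line.length - 2 * (line.length / 2 - k)))).map
        (fun k => line.length - 2 * (line.length / 2 - k)) := by
  cases hF : (List.range (line.length - 1)).find? (pal2 line) with
  | none =>
    rw [List.find?_range_eq_none] at hF
    rw [List.find?_range_eq_none.mpr ?_]
    · rfl
    · intro k hk
      have := hF (line.length - 2 * (line.length / 2 - k)) (by omega)
      simpa using this
  | some s =>
    rw [List.find?_range_eq_some] at hF
    obtain ⟨hps, hmem, hmin⟩ := hF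
    rw [List.mem_range] at hmem
    have heven := pal2_even hps
    have hks : s = line.length - 2 * (line.length / 2 - (line.length / 2 - (line.length - s) / 2)) := by
      omega
    have hklt : line.length / 2 - (line.length - s) / 2 < line.length / 2 := by omega
    rw [List.find?_range_eq_some.mpr ⟨by rw [← hks]; exact hps, by simpa using hklt, ?_⟩]
    · simp [← hks]
    · intro k' hk'
      have := hmin (line.length - 2 * (line.length / 2 - k')) (by omega)
      simpa using this

-- ---- B-side characterisation ----

theorem sieve_eq_filter (line : List Int) (n : Nat) (init : List Nat) (m : Nat) :
    (List.range m).foldl (pvSieveStep line n) init =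
      init.filter (fun p => (List.range m).all (fun d => pvOK line n d p)) := by
  induction m with
  | zero => simp
  | succ m ih =>
    rw [List.range_succ, List.foldl_append, ih, List.foldl_cons, List.foldl_nil]
    have hstep : ∀ cs : List Nat, pvSieveStep line n cs m = cs.filter (pvOK line n m) := by
      intro cs
      unfold pvSieveStep
      cases cs <;> simp
    rw [hstep, List.filter_filter]
    refine List.filter_congr (fun p _ => ?_)
    simp [List.all_append, Bool.and_comm]

theorem head?_filter_eq_find? {α : Type} (p : α → Bool) (l : List α) :
    (l.filter p).head? = l.find? p := by
  induction l with
  | nil => rfl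
  | cons a t ih =>
    by_cases h : p a
    · simp [h]
    · simp only [List.filter_cons, List.find?_cons]
      rw [if_neg (by simpa using h)]
      cases hpa : p a
      · exact ih
      · exact absurd hpa (by simpa using h)

def ReflB (line : List Int) (p : Nat) : Bool :=
  (List.range (line.length / 2)).all (fun d => pvOK line line.length d p)

theorem alt_eq_find? (line : List Int) :
    find_symetrie_alt line =
      match (List.range' 1 (line.length - 1)).find? (ReflB line) with
      | some p => (p : Int)
      | none => 0 := by
  unfold find_symetrie_alt
  rw [sieve_eq_filter]
  rw [show (List.range' 1 (line.length - 1)).filter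
        (fun p => (List.range (line.length / 2)).all (fun d => pvOK line line.length d p)) =
      (List.range' 1 (line.length - 1)).filter (ReflB line) from rfl]
  cases h : (List.range' 1 (line.length - 1)).find? (ReflB line) with
  | none =>
    have := head?_filter_eq_find? (ReflB line) (List.range' 1 (line.length - 1))
    rw [h] at this
    rw [List.head?_eq_none_iff] at this
    simp [this]
  | some p =>
    have := head?_filter_eq_find? (ReflB line) (List.range' 1 (line.length - 1))
    rw [h] at this
    cases hf : (List.range' 1 (line.length - 1)).filter (ReflB line) with
    | nil => rw [hf] at this; simp at this
    | cons a t =>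
      rw [hf] at this
      simp only [List.head?_cons, Option.some.injEq] at this
      simp [this]

-- ReflB as a ∀ over the nontrivially-guarded distances
theorem reflB_iff (line : List Int) (p : Nat) :
    ReflB line p = true ↔
      ∀ d, d < line.length / 2 → p < 1 + d ∨ line.length ≤ p + d ∨
        line.getD (p - 1 - d) 0 = line.getD (p + d) 0 := by
  unfold ReflB pvOK
  rw [List.all_eq_true]
  constructor
  · intro h d hd
    have := h d (List.mem_range.mpr hd)
    simp only [Bool.or_eq_true, decide_eq_true_eq, beq_iff_eq] at this
    tauto
  · intro h d hd
    have := h d (List.mem_range.mp hd)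
    simp only [Bool.or_eq_true, decide_eq_true_eq, beq_iff_eq]
    tauto

-- (i) prefix axes: 1 ≤ p ≤ n/2
theorem reflB_eq_pal1 (line : List Int) (p : Nat) (h1 : 1 ≤ p) (h2 : p ≤ line.length / 2) :
    ReflB line p = pal1 line (2 * p - 1) := by
  have hn : 2 * p ≤ line.length := by omega
  rw [Bool.eq_iff_iff, reflB_iff]
  unfold pal1
  rw [Bool.and_eq_true, List.all_eq_true]
  simp only [List.mem_range, beq_iff_eq,
    show (2 * p - 1 + 1) / 2 = p from by omega,
    show ((2 * p - 1) % 2 == 1) = true from by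
      rw [beq_iff_eq]; omega, true_and]
  constructor
  · intro h i hi
    have := h (p - 1 - i) (by omega)
    rcases this with hc | hc | hc
    · omega
    · omega
    · rw [show p - 1 - (p - 1 - i) = i from by omega,
        show p + (p - 1 - i) = 2 * p - 1 - i from by omega] at hc
      exact hc
  · intro h d hd
    rcases Nat.lt_or_ge d p with hdp | hdp
    · right; right
      have := h (p - 1 - d) (by omega)
      rw [show 2 * p - 1 - (p - 1 - d) = p + d from by omega] at this
      exact this
    · left; omega

-- (ii) suffix axes: n/2 < p ≤ n - 1
theorem reflB_eq_pal2 (line : List Int) (p : Nat) (h1 : line.length / 2 < p)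
    (h2 : p ≤ line.length - 1) (hn : 1 ≤ line.length) :
    ReflB line p = pal2 line (2 * p - line.length) := by
  set n := line.length with hnn
  have hs : 2 * p - n + (n - p) = p := by omega
  have hh1 : 1 ≤ n - p := by omega
  rw [Bool.eq_iff_iff, reflB_iff]
  unfold pal2
  simp only [← hnn]
  rw [Bool.and_eq_true, Bool.and_eq_true, List.all_eq_true]
  simp only [List.mem_range'_1, beq_iff_eq,
    show n - (2 * p - n) = 2 * (n - p) from by omega,
    show (2 * (n - p)) % 2 == 0 from by rw [beq_iff_eq]; omega,
    show 2 * (n - p) / 2 - 1 = n - p - 1 from by omega, true_and]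
  constructor
  · intro h
    constructor
    · have := h (n - p - 1) (by omega)
      rcases this with hc | hc | hc
      · omega
      · omega
      · rw [show p - 1 - (n - p - 1) = 2 * p - n from by omega,
          show p + (n - p - 1) = n - 1 from by omega] at hc
        exact hc
    · intro i hi
      have := h (n - p - 1 - i) (by omega)
      rcases this with hc | hc | hc
      · omega
      · omega
      · rw [show p - 1 - (n - p - 1 - i) = 2 * p - n + i from by omega,
          show p + (n - p - 1 - i) = n - 1 - i from by omega] at hc
        exact hc
  · rintro ⟨h0, hrest⟩ d hd
    rcases Nat.lt_or_ge d (n - p) with hdp | hdp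
    · right; right
      rcases Nat.eq_zero_or_pos (n - p - 1 - d) with hz | hpos
      · -- d = n - p - 1 : the anchored pair
        rw [show p - 1 - d = 2 * p - n from by omega,
          show p + d = n - 1 from by omega]
        exact h0
      · have := hrest (n - p - 1 - d) ⟨by omega, by omega⟩
        rw [show 2 * p - n + (n - p - 1 - d) = p - 1 - d from by omega,
          show n - 1 - (n - p - 1 - d) = p + d from by omega] at this
        exact this
    · right; left; omega

-- for n even, the whole-line candidate of loop2 coincides with pal1 (n-1)
theorem pal2_zero_eq_pal1 (line : List Int) (hn : 2 ≤ line.length)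
    (hev : line.length % 2 = 0) : pal2 line 0 = pal1 line (line.length - 1) := by
  set n := line.length with hnn
  rw [Bool.eq_iff_iff]
  unfold pal1 pal2
  simp only [← hnn]
  rw [Bool.and_eq_true, Bool.and_eq_true, Bool.and_eq_true, List.all_eq_true, List.all_eq_true]
  simp only [List.mem_range'_1, List.mem_range, beq_iff_eq, Nat.sub_zero, Nat.zero_add,
    show ((n - 1) % 2 == 1) = true from by rw [beq_iff_eq]; omega,
    show (n % 2 == 0) = true from by rw [beq_iff_eq]; omega,
    show (n - 1 + 1) / 2 = n / 2 from by omega, true_and]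
  constructor
  · rintro ⟨h0, hrest⟩ i hi
    rcases Nat.eq_zero_or_pos i with hz | hpos
    · subst hz; simpa using h0
    · have := hrest i ⟨hpos, by omega⟩
      rw [show n - 1 - i = n - 1 - i from rfl] at this
      exact this
  · intro h
    refine ⟨by simpa using h 0 (by omega), fun i hi => ?_⟩
    exact h i (by omega)

theorem find?_congr_mem {α : Type} {l : List α} {p q : α → Bool}
    (h : ∀ x ∈ l, p x = q x) : l.find? p = l.find? q := by
  induction l with
  | nil => rfl
  | cons a t ih =>
    simp only [List.find?]
    rw [h a (List.mem_cons_self)]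
    cases q a
    · exact ih (fun x hx => h x (List.mem_cons_of_mem a hx))
    · rfl

theorem range_eq_cons {m : Nat} (h : 1 ≤ m) : List.range m = 0 :: List.range' 1 (m - 1) := by
  cases m with
  | zero => omega
  | succ k => rw [List.range_eq_range', List.range'_succ]; simp

theorem AB_eq (line : List Int) (hne : line ≠ []) :
    find_symetrie line = find_symetrie_alt line := by
  have hn1 : 1 ≤ line.length := List.length_pos_iff.mpr hne
  set n := line.length with hnn
  set m := n / 2 with hm
  unfold find_symetrie
  rw [pvLoop1_eq, pvLoop2_eq, alt_eq_find?, F1_eq_G1, ← hnn,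
    show List.range' 0 (n - 1 - 0) = List.range (n - 1) from by
      rw [List.range_eq_range', Nat.sub_zero], F2_eq_G2, ← hnn, ← hm]
  -- split B's axis list into prefix axes (1..m) and suffix axes (m+1..n-1)
  have hsplit : List.range' 1 (n - 1) =
      List.range' 1 m ++ List.range' (1 + m) (n - 1 - m) := by
    have := List.range'_append_1 (s := 1) (m := m) (n := n - 1 - m)
    rw [show m + (n - 1 - m) = n - 1 from by omega] at this
    exact this.symm
  rw [hsplit, List.find?_append]
  -- the prefix part equals loop1's search
  have hpre : (List.range' 1 m).find? (ReflB line) =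
      ((List.range m).find? (fun k => pal1 line (2 * k + 1))).map (fun k => 1 + k) := by
    rw [List.range'_eq_map_range, List.find?_map]
    congr 1
    refine find?_congr_mem (fun k hk => ?_)
    have hkm : k < m := List.mem_range.mp hk
    simp only [Function.comp_apply]
    rw [reflB_eq_pal1 line (1 + k) (by omega) (by omega),
      show 2 * (1 + k) - 1 = 2 * k + 1 from by omega]
  rw [hpre]
  cases hG1 : (List.range m).find? (fun k => pal1 line (2 * k + 1)) with
  | some k =>
    simp only [Option.map_some, Option.some_or]
    simp only [show (2 * k + 1 + 1) / 2 = k + 1 from by omega]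
    push_cast
    ring
  | none =>
    simp only [Option.map_none, Option.none_or]
    -- loop1 found nothing: every pal1 (2k+1) is false for k < m
    have hno1 : ∀ k, k < m → pal1 line (2 * k + 1) = false := by
      intro k hk
      have := List.find?_range_eq_none.mp hG1 k hk
      simpa using this
    -- the suffix part equals loop2's search (minus, for even n, its dead k=0 candidate)
    have hsuf : (List.range' (1 + m) (n - 1 - m)).find? (ReflB line) =
        ((List.range m).find? (fun k => pal2 line (n - 2 * (m - k)))).map
          (fun k => n - (m - k)) := by
      rcases Nat.even_or_odd n with ⟨t, ht⟩ | ⟨t, ht⟩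
      · -- n even: n = 2m, loop2's k=0 candidate is pal2 0 = pal1 (n-1) = false
        have hnm : n = 2 * m := by omega
        rcases Nat.eq_zero_or_pos m with hm0 | hm1
        · rw [show n - 1 - m = 0 from by omega, hm0]
          rfl
        have h0 : pal2 line (n - 2 * (m - 0)) = false := by
          rw [show n - 2 * (m - 0) = 0 from by omega,
            pal2_zero_eq_pal1 line (by omega) (by omega)]
          have := hno1 (m - 1) (by omega)
          rw [show 2 * (m - 1) + 1 = n - 1 from by omega] at this
          exact this
        rw [range_eq_cons hm1, List.find?_cons_of_neg (by simpa using h0)]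
        have hmap : List.range' (1 + m) (n - 1 - m) =
            (List.range' 1 (m - 1)).map (fun k => m + k) := by
          rw [List.range'_eq_map_range, List.range'_eq_map_range, List.map_map,
            show n - 1 - m = m - 1 from by omega]
          exact List.map_congr_left (fun x _ => by simp; omega)
        rw [hmap, List.find?_map]
        have hpeq : (List.range' 1 (m - 1)).find? (ReflB line ∘ fun k => m + k) =
            (List.range' 1 (m - 1)).find? (fun k => pal2 line (n - 2 * (m - k))) := by
          refine find?_congr_mem (fun k hk => ?_)
          rw [List.mem_range'_1] at hk
          simp only [Function.comp_apply]
          rw [reflB_eq_pal2 line (m + k) (by omega) (by omega) (by omega),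
            show 2 * (m + k) - n = n - 2 * (m - k) from by omega]
        rw [hpeq]
        cases hf : (List.range' 1 (m - 1)).find? (fun k => pal2 line (n - 2 * (m - k))) with
        | none => simp
        | some k =>
          have hk := List.mem_range'_1.mp (List.mem_of_find?_eq_some hf)
          simp only [Option.map_some, Option.some.injEq]
          omega
      · -- n odd: n = 2m+1, counts match exactly
        have hnm : n = 2 * m + 1 := by omega
        have hmap : List.range' (1 + m) (n - 1 - m) =
            (List.range m).map (fun k => m + 1 + k) := by
          rw [List.range'_eq_map_range, show n - 1 - m = m from by omega]
          exact List.map_congr_left (fun x _ => by omega)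
        rw [hmap, List.find?_map]
        have hpeq : (List.range m).find? (ReflB line ∘ fun k => m + 1 + k) =
            (List.range m).find? (fun k => pal2 line (n - 2 * (m - k))) := by
          refine find?_congr_mem (fun k hk => ?_)
          have hkm : k < m := List.mem_range.mp hk
          simp only [Function.comp_apply]
          rw [reflB_eq_pal2 line (m + 1 + k) (by omega) (by omega) (by omega),
            show 2 * (m + 1 + k) - n = n - 2 * (m - k) from by omega]
        rw [hpeq]
        cases hf : (List.range m).find? (fun k => pal2 line (n - 2 * (m - k))) with
        | none => simp
        | some k =>
          have hk := List.mem_range.mp (List.mem_of_find?_eq_some hf)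
          simp only [Option.map_some, Option.some.injEq]
          omega
    rw [hsuf]
    cases hG2 : (List.range m).find? (fun k => pal2 line (n - 2 * (m - k))) with
    | some k =>
      have hk : k < m := List.mem_range.mp (List.mem_of_find?_eq_some hG2)
      simp only [Option.map_some]
      simp only [show (n - 2 * (m - k) + n) / 2 = n - (m - k) from by omega]
    | none => simp

-- ===== VERDICT (by name: the statement is the Claim_ definition above) =====
theorem find_symetrie_spec : Claim_equal_find_symetrie := by
  intro line _ hpre
  unfold Spec_find_symetrie
  exact AB_eq line hpre
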